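-- pv_equiv track=rewrite | github.com/pinanino/python-scripts | project/FIFO.py | bledy_strony_fifo
-- ===== SOURCE A (Python) =====
-- from collections import deque
--
-- def bledy_strony_fifo(strony, ilosc, pojemnosc):
--     pamiec = set()
--     kolejka = deque()
--     bledy = 0
--
-- #Sprawdzamy czy strona znajduje się w pamięci
-- #Szukamy tej, która jest najstarsza i ją usuwamy, a następnie dodajemy nową do pamięci i kolejki
--     for strona in strony:
--         if strona not in pamiec:
--             if len(pamiec) >= pojemnosc:
--                 usunieta = kolejka.popleft()
--                 pamiec.remove(usunieta)
--
--             pamiec.add(strona)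
--             kolejka.append(strona)
--             bledy += 1
--
--     return bledy
-- ===== SOURCE B (Python) =====
-- def bledy_strony_fifo(strony, ilosc, pojemnosc):
--     # Fault-clock formulation: number the faults 0,1,2,...; the page loaded at
--     # fault t stays resident under FIFO exactly until pojemnosc further faults
--     # have happened, so a reference is a hit iff its page's last fault number
--     # is >= faults - pojemnosc.  No memory contents are simulated at all.
--     last = {}
--     faults = 0
--     for strona in strony:
--         t = last.get(strona)
--         if t is None or t < faults - pojemnosc:
--             last[strona] = faults
--             faults += 1
--     return faults
-- ===== Notes on version B (the rewrite author's own statement) =====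
-- stated objective: alternative
-- what changed: Replaces the simulated memory (set + eviction queue) by the fault-clock characterisation of FIFO: faults are numbered consecutively, a dict stores each page's last fault number, and a reference is a hit iff that number is >= faults - pojemnosc; no memory contents are maintained or evicted.
import Mathlib
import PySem

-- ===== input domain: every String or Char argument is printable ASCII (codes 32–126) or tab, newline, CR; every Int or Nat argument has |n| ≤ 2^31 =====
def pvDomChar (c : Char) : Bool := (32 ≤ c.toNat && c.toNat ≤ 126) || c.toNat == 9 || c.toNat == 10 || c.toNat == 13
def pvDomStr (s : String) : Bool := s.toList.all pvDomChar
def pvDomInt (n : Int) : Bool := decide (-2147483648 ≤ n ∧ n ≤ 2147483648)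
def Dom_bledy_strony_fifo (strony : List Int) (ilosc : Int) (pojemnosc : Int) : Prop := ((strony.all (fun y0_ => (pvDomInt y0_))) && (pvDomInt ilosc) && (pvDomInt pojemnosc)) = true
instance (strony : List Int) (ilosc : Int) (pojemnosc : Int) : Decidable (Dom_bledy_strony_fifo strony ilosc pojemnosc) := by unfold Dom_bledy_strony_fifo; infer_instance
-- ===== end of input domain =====

-- B drops A's simulated memory (set+deque with eviction) for the fault-clock
-- characterisation of FIFO: a dict of last fault numbers and a fault counter;
-- a reference hits iff its page's last fault number is >= faults - pojemnosc.


-- ===== PORT A =====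
-- one loop iteration of A: state = (pamiec, kolejka, bledy)
def fifoStepA (pojemnosc : Int) (st : PySem.Set Int × List Int × Int) (strona : Int) :
    PySem.Set Int × List Int × Int :=
  let pamiec := st.1
  let kolejka := st.2.1
  let bledy := st.2.2
  if strona ∈ pamiec then st
  else
    let pk : PySem.Set Int × List Int :=
      if (pamiec.length : Int) ≥ pojemnosc then
        match kolejka with
        | [] => (pamiec, kolejka)  -- kolejka.popleft() raises IndexError here; outside Pre_
        | usunieta :: rest => ((PySem.Set.remove? pamiec usunieta).getD pamiec, rest)
      else (pamiec, kolejka)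
    (PySem.Set.add pk.1 strona, pk.2 ++ [strona], bledy + 1)

def bledy_strony_fifo (strony : List Int) (ilosc : Int) (pojemnosc : Int) : Int :=
  (strony.foldl (fifoStepA pojemnosc) (PySem.Set.empty, ([], 0))).2.2

-- ===== PORT B =====
-- one loop iteration of B: state = (last, faults); 't is None or t < faults - c'
def fifoClockStep (pojemnosc : Int) (st : PySem.Dict Int Int × Int) (strona : Int) :
    PySem.Dict Int Int × Int :=
  let last := st.1
  let faults := st.2
  match PySem.Dict.get? last strona with
  | none => (PySem.Dict.insert last strona faults, faults + 1)
  | some t =>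
      if t < faults - pojemnosc then (PySem.Dict.insert last strona faults, faults + 1)
      else st

def bledy_strony_fifo_alt (strony : List Int) (ilosc : Int) (pojemnosc : Int) : Int :=
  (strony.foldl (fifoClockStep pojemnosc) (PySem.Dict.empty, 0)).2

-- ===== PRECONDITION & SPEC =====
-- Pre_ excludes exactly the inputs on which Python A raises IndexError
-- (a nonempty reference string with pojemnosc ≤ 0: popleft from an empty deque).
def Pre_bledy_strony_fifo (strony : List Int) (ilosc : Int) (pojemnosc : Int) : Prop :=
  strony = [] ∨ 1 ≤ pojemnosc
instance (strony : List Int) (ilosc : Int) (pojemnosc : Int) : Decidable (Pre_bledy_strony_fifo strony ilosc pojemnosc) := by unfold Pre_bledy_strony_fifo; infer_instance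

def pvWitness_bledy_strony_fifo : List Int × Int × Int := ([1, 2, 3, 1, 4, 1, 2], 7, 2)

def Spec_bledy_strony_fifo (strony : List Int) (ilosc : Int) (pojemnosc : Int) (out : Int) : Prop := out = bledy_strony_fifo_alt strony ilosc pojemnosc
instance (strony : List Int) (ilosc : Int) (pojemnosc : Int) (out : Int) : Decidable (Spec_bledy_strony_fifo strony ilosc pojemnosc out) := by unfold Spec_bledy_strony_fifo; infer_instance

-- ===== CLAIM (what is proved, stated in full; the proofs are below) =====
def Claim_equal_bledy_strony_fifo : Prop := ∀ (strony : List Int) (ilosc : Int) (pojemnosc : Int), Dom_bledy_strony_fifo strony ilosc pojemnosc → Pre_bledy_strony_fifo strony ilosc pojemnosc → Spec_bledy_strony_fifo strony ilosc pojemnosc (bledy_strony_fifo strony ilosc pojemnosc)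

-- ===== LEMMAS AND PROOFS =====

-- Ghost intermediate (proof-only): the fault log itself.  Both programs are
-- related to the fold that appends each faulting page to a log, where a hit
-- is membership in the log's last `pojemnosc` entries.
def fifoLogStep (pojemnosc : Int) (log : List Int) (strona : Int) : List Int :=
  if strona ∈ log.drop (log.length - pojemnosc.toNat) then log
  else log ++ [strona]

-- Coupling invariant A ↔ log (for 1 ≤ c): A's pamiec coincides (as a list)
-- with its kolejka, which is duplicate-free, equals the last c entries of the
-- fault log, and A's counter is the log's length.
def LogInv (c : Int) (a : PySem.Set Int × List Int × Int) (log : List Int) : Prop :=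
  a.1 = a.2.1 ∧ a.2.1.Nodup ∧ a.2.2 = (log.length : Int) ∧
  a.2.1 = log.drop (log.length - c.toNat)

lemma fifoLogStep_inv (c : Int) (hc : 1 ≤ c) (a : PySem.Set Int × List Int × Int)
    (log : List Int) (h : LogInv c a log) (strona : Int) :
    LogInv c (fifoStepA c a strona) (fifoLogStep c log strona) := by
  obtain ⟨pamiec, kolejka, bledy⟩ := a
  obtain ⟨h1, h2, h3, h4⟩ := h
  simp only [LogInv] at h1 h2 h3 h4 ⊢
  have hmemiff : strona ∈ pamiec ↔ strona ∈ log.drop (log.length - c.toNat) := by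
    rw [h1, h4]
  by_cases hmem : strona ∈ log.drop (log.length - c.toNat)
  · have hA : strona ∈ pamiec := hmemiff.mpr hmem
    simp only [fifoStepA, fifoLogStep, if_pos hA, if_pos hmem]
    exact ⟨h1, h2, h3, h4⟩
  · have hA : strona ∉ pamiec := fun hh => hmem (hmemiff.mp hh)
    have hnk : strona ∉ kolejka := by rw [← h1]; exact hA
    have hklen : kolejka.length = log.length - (log.length - c.toNat) := by
      rw [h4, List.length_drop]
    simp only [fifoStepA, fifoLogStep, if_neg hA, if_neg hmem]
    by_cases hfull : (pamiec.length : Int) ≥ c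
    · -- memory full: |kolejka| = c.toNat, c.toNat ≤ |log|
      have hplen : pamiec.length = kolejka.length := by rw [h1]
      have hkc : kolejka.length = c.toNat := by
        have hcast : ((c.toNat : Int)) = c := Int.toNat_of_nonneg (by omega)
        have : (kolejka.length : Int) ≥ c := by rw [← hplen]; exact hfull
        omega
      have hlc : c.toNat ≤ log.length := by omega
      match hkol : kolejka with
      | [] => simp at hkc; omega
      | u :: rest =>
        have hur : u ∈ pamiec := by rw [h1]; exact List.mem_cons_self
        have hnr : u ∉ rest := (List.nodup_cons.mp h2).1
        have hdisc : PySem.Set.discard pamiec u = rest := by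
          rw [h1]
          simp only [PySem.Set.discard]
          rw [List.filter_cons_of_neg (by simp)]
          refine List.filter_eq_self.mpr fun y hy => ?_
          have hne : ¬ (y = u) := fun e => hnr (e ▸ hy)
          simp [hne]
        have hrm : PySem.Set.remove? pamiec u = some rest := by
          rw [PySem.Set.remove?_of_mem hur, hdisc]
        have hns : strona ∉ rest := fun hh => hnk (List.mem_cons_of_mem _ hh)
        have hlt : log.length - c.toNat < log.length := by omega
        have h4' : u :: rest = log[log.length - c.toNat] :: log.drop (log.length - c.toNat + 1) := by
          rw [h4, List.drop_eq_getElem_cons hlt]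
        have hrest : rest = log.drop (log.length - c.toNat + 1) := by
          injection h4'
        simp only [if_pos hfull, hrm, Option.getD_some]
        refine ⟨?_, ?_, ?_, ?_⟩
        · rw [PySem.Set.add_of_not_mem hns]
        · simp only [List.nodup_append]
          refine ⟨(List.nodup_cons.mp h2).2, List.nodup_singleton _, fun a ha b hb => ?_⟩
          simp only [List.mem_singleton] at hb
          exact fun e => hns ((e.trans hb) ▸ ha)
        · simp [h3]
        · have hdropc : (log ++ [strona]).length - c.toNat = (log.length - c.toNat) + 1 := by
            simp; omega
          rw [hdropc, List.drop_append_of_le_length (by omega), hrest]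
    · -- memory not yet full: |log| < c.toNat, kolejka = log
      have hplen : pamiec.length = kolejka.length := by rw [h1]
      have hsmall : log.length < c.toNat := by
        by_contra hge
        have hcast : ((c.toNat : Int)) = c := Int.toNat_of_nonneg (by omega)
        have hkc : kolejka.length = c.toNat := by omega
        have : (pamiec.length : Int) ≥ c := by rw [hplen, hkc, hcast]
        exact hfull this
      have hkl : kolejka = log := by
        rw [h4, Nat.sub_eq_zero_of_le (by omega), List.drop_zero]
      simp only [if_neg hfull]
      refine ⟨?_, ?_, ?_, ?_⟩
      · rw [PySem.Set.add_of_not_mem hA, h1]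
      · simp only [List.nodup_append]
        refine ⟨h2, List.nodup_singleton _, fun a ha b hb => ?_⟩
        simp only [List.mem_singleton] at hb
        exact fun e => hnk ((e.trans hb) ▸ ha)
      · simp [h3]
      · rw [hkl, Nat.sub_eq_zero_of_le (by simp; omega), List.drop_zero]

lemma fifoLogFold_inv (c : Int) (hc : 1 ≤ c) (l : List Int)
    (a : PySem.Set Int × List Int × Int) (log : List Int) (h : LogInv c a log) :
    LogInv c (l.foldl (fifoStepA c) a) (l.foldl (fifoLogStep c) log) := by
  induction l generalizing a log with
  | nil => exact h
  | cons x xs ih => exact ih _ _ (fifoLogStep_inv c hc a log h x)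

-- Coupling invariant B ↔ log: the counter is the log length and the dict maps
-- each page to its LAST occurrence index in the log (absent keys never faulted).
def ClockInv (st : PySem.Dict Int Int × Int) (log : List Int) : Prop :=
  st.2 = (log.length : Int) ∧
  (∀ x : Int, st.1.get? x = none → x ∉ log) ∧
  (∀ (x t : Int), st.1.get? x = some t →
    0 ≤ t ∧ t.toNat < log.length ∧ log[t.toNat]? = some x ∧ x ∉ log.drop (t.toNat + 1))

lemma fifoClockStep_inv (c : Int) (hc : 1 ≤ c) (st : PySem.Dict Int Int × Int)
    (log : List Int) (h : ClockInv st log) (strona : Int) :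
    ClockInv (fifoClockStep c st strona) (fifoLogStep c log strona) := by
  obtain ⟨last, faults⟩ := st
  obtain ⟨h1, h2, h3⟩ := h
  simp only at h1 h2 h3
  have hcast : ((c.toNat : Int)) = c := Int.toNat_of_nonneg (by omega)
  -- B's hit test agrees with membership in the log's last c entries
  have hit_iff : (∃ t, last.get? strona = some t ∧ ¬ t < faults - c) ↔
      strona ∈ log.drop (log.length - c.toNat) := by
    constructor
    · rintro ⟨t, hget, hge⟩
      obtain ⟨ht0, htlt, hte, -⟩ := h3 strona t hget
      have hidx : log.length - c.toNat ≤ t.toNat := by omega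
      have : (log.drop (log.length - c.toNat))[t.toNat - (log.length - c.toNat)]? = some strona := by
        rw [List.getElem?_drop, Nat.add_sub_cancel' hidx]; exact hte
      exact List.mem_of_getElem? this
    · intro hmem
      match hget : last.get? strona with
      | none => exact absurd (List.mem_of_mem_drop hmem) (h2 strona hget)
      | some t =>
        refine ⟨t, rfl, ?_⟩
        intro hlt
        obtain ⟨ht0, htlt, -, hnot⟩ := h3 strona t hget
        have hle : t.toNat + 1 ≤ log.length - c.toNat := by omega
        have : strona ∈ log.drop (t.toNat + 1) := by
          have := hmem
          rw [show log.length - c.toNat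
              = (t.toNat + 1) + (log.length - c.toNat - (t.toNat + 1)) by omega,
            ← List.drop_drop] at this
          exact List.mem_of_mem_drop this
        exact hnot this
  by_cases hmem : strona ∈ log.drop (log.length - c.toNat)
  · obtain ⟨t, hget, hge⟩ := hit_iff.mpr hmem
    simp only [fifoClockStep, fifoLogStep, hget, if_neg hge, if_pos hmem]
    exact ⟨h1, h2, h3⟩
  · have hmiss : ∀ t, last.get? strona = some t → t < faults - c := by
      intro t hget
      by_contra hge
      exact hmem (hit_iff.mp ⟨t, hget, hge⟩)
    have hstep : fifoClockStep c (last, faults) strona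
        = (PySem.Dict.insert last strona faults, faults + 1) := by
      simp only [fifoClockStep]
      match hget : last.get? strona with
      | none => rfl
      | some t => simp [if_pos (hmiss t hget)]
    rw [hstep]
    simp only [fifoLogStep, if_neg hmem]
    refine ⟨by simp [h1], ?_, ?_⟩
    · intro x hget
      by_cases hx : x = strona
      · rw [PySem.Dict.get?_insert, if_pos hx] at hget
        cases hget
      · rw [PySem.Dict.get?_insert, if_neg hx] at hget
        have := h2 x hget
        simp only [List.mem_append, List.mem_singleton]
        rintro (hxl | hxe)
        · exact this hxl
        · exact hx hxe
    · intro x t hget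
      by_cases hx : x = strona
      · rw [PySem.Dict.get?_insert, if_pos hx] at hget
        -- x = strona, t = faults = log.length
        obtain rfl : t = faults := by injection hget with e; omega
        subst hx
        refine ⟨by omega, by simp only [List.length_append, List.length_cons, List.length_nil]; omega, ?_, ?_⟩
        · rw [show t.toNat = log.length by omega]
          simp
        · rw [show t.toNat + 1 = (log ++ [x]).length by simp; omega]
          simp
      · rw [PySem.Dict.get?_insert, if_neg hx] at hget
        obtain ⟨ht0, htlt, hte, hnot⟩ := h3 x t hget
        refine ⟨ht0, by simp; omega, ?_, ?_⟩
        · rw [List.getElem?_append_left htlt]; exact hte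
        · rw [List.drop_append_of_le_length (by omega)]
          simp only [List.mem_append, List.mem_singleton]
          rintro (hxl | hxe)
          · exact hnot hxl
          · exact hx hxe

lemma fifoClockFold_inv (c : Int) (hc : 1 ≤ c) (l : List Int)
    (st : PySem.Dict Int Int × Int) (log : List Int) (h : ClockInv st log) :
    ClockInv (l.foldl (fifoClockStep c) st) (l.foldl (fifoLogStep c) log) := by
  induction l generalizing st log with
  | nil => exact h
  | cons x xs ih => exact ih _ _ (fifoClockStep_inv c hc st log h x)

-- ===== VERDICT (by name: the statement is the Claim_ definition above) =====
theorem bledy_strony_fifo_spec : Claim_equal_bledy_strony_fifo := by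
  intro strony ilosc pojemnosc _ hpre
  unfold Spec_bledy_strony_fifo bledy_strony_fifo bledy_strony_fifo_alt
  rcases hpre with h | h
  · subst h; rfl
  · have hA : LogInv pojemnosc (PySem.Set.empty, ([], 0)) [] :=
      ⟨rfl, List.nodup_nil, rfl, by simp⟩
    have hB : ClockInv (PySem.Dict.empty, 0) [] := by
      refine ⟨rfl, fun x _ => List.not_mem_nil, fun x t hget => ?_⟩
      rw [PySem.Dict.get?_empty] at hget
      exact absurd hget (by simp)
    have hAlog := (fifoLogFold_inv pojemnosc h strony _ _ hA).2.2.1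
    have hBlog := (fifoClockFold_inv pojemnosc h strony _ _ hB).1
    rw [hAlog, hBlog]
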